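-- pv_equiv track=rewrite | github.com/njankowski/dftools | util/compression.py | find_duplicate_rows
-- ===== SOURCE A (Python) =====
-- def find_duplicate_rows(data, width):
--     height = len(data) // width
--
--     # Split data into rows.
--     index = 0
--     split_data = [[] for i in range(height)]
--     for i in range(height):
--         split_data[i].extend(data[index : index + width])
--         index += width
--
--     # Find and mark duplicates.
--     # List of tuples in the form (parent row, duplicate row).
--     removed_rows = []
--     for i in range(height):
--         # Skip if already marked as duplicate.
--         if [item for item in removed_rows if item[1] == i]:
--             continue
--         for j in range(i + 1, height):
--             if split_data[i] == split_data[j]: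
--                 removed_rows.append((i, j))
--
--     # Remove duplicates.
--     cleaned_data = []
--     for i in range(height):
--         # Do not copy data if marked as duplicate.
--         if [item for item in removed_rows if item[1] == i]:
--             continue
--         else:
--             cleaned_data.append(split_data[i])
--
--     # Flatten data.
--     flattened_data = []
--     for row in cleaned_data:
--         flattened_data.extend(row)
--
--     return (removed_rows, flattened_data)
-- ===== SOURCE B (Python) =====
-- def find_duplicate_rows(data, width):
--     height = len(data) // width
--     # Group row indices by row content; dict preserves first-occurrence order.
--     groups = {}
--     for i in range(height):
--         row = tuple(data[i * width : (i + 1) * width])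
--         groups.setdefault(row, []).append(i)
--     removed_rows = []
--     flattened_data = []
--     for row, idxs in groups.items():
--         for j in idxs[1:]:
--             removed_rows.append((idxs[0], j))
--         flattened_data.extend(row)
--     return (removed_rows, flattened_data)
-- ===== Notes on version B (the rewrite author's own statement) =====
-- stated objective: faster
-- what changed: replaces A's quadratic all-pairs row comparison and repeated rescans of removed_rows by a single pass that groups row indices in a dict keyed by row content (insertion order = first-occurrence order), from which duplicates and the cleaned data are read off directly
import Mathlib
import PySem

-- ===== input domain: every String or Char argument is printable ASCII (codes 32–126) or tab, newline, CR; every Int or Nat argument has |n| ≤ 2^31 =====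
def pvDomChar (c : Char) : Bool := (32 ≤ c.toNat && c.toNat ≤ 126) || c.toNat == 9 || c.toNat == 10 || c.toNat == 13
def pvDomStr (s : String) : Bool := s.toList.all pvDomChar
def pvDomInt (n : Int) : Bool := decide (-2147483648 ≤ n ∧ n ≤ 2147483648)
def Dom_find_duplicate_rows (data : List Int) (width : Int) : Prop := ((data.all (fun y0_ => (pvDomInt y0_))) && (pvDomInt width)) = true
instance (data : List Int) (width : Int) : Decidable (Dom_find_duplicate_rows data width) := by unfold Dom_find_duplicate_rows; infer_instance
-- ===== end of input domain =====

-- B replaces A's quadratic all-pairs row comparison by one dict-grouping pass over the rows (same return value; proved equal for width ≠ 0).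


-- ===== PORT A =====
def find_duplicate_rows (data : List Int) (width : Int) : (List (Int × Int)) × List Int :=
  let height : Int := PySem.Int.floordiv (data.length : Int) width
  -- split_data = [[] for i in range(height)]; then extend each with data[index:index+width]
  let sd0 : List (List Int) := (PySem.List.pyRange 0 height 1).map (fun _ => ([] : List Int))
  let st : List (List Int) × Int := (PySem.List.pyRange 0 height 1).foldl
    (fun st i =>
      (PySem.List.pySetD st.1 i ((PySem.List.pyGetD st.1 i []) ++ PySem.List.slice data (some st.2) (some (st.2 + width))),
       st.2 + width))
    (sd0, 0)
  let split_data := st.1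
  let removed_rows : List (Int × Int) := (PySem.List.pyRange 0 height 1).foldl
    (fun rr i =>
      if (rr.filter (fun item => item.2 == i)) ≠ [] then rr
      else (PySem.List.pyRange (i + 1) height 1).foldl
        (fun rr2 j =>
          if (PySem.List.pyGetD split_data i []) == (PySem.List.pyGetD split_data j []) then rr2 ++ [(i, j)] else rr2)
        rr)
    []
  let cleaned_data : List (List Int) := (PySem.List.pyRange 0 height 1).foldl
    (fun cd i =>
      if (removed_rows.filter (fun item => item.2 == i)) ≠ [] then cd
      else cd ++ [PySem.List.pyGetD split_data i []])
    []
  let flattened_data : List Int := cleaned_data.foldl (fun acc row => acc ++ row) []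
  (removed_rows, flattened_data)

-- ===== PORT B =====
def find_duplicate_rows_alt (data : List Int) (width : Int) : (List (Int × Int)) × List Int :=
  let height : Int := PySem.Int.floordiv (data.length : Int) width
  -- groups.setdefault(row, []).append(i)  ==  groups[row] = groups.get(row, []) + [i]
  let groups : PySem.Dict (List Int) (List Int) := (PySem.List.pyRange 0 height 1).foldl
    (fun g i => g.modify (PySem.List.slice data (some (i * width)) (some ((i + 1) * width))) [] (fun l => l ++ [i]))
    PySem.Dict.empty
  let res : List (Int × Int) × List Int := groups.items.foldl
    (fun acc p =>
      ((PySem.List.slice p.2 (some 1) none).foldl (fun rr j => rr ++ [(PySem.List.pyGetD p.2 0 0, j)]) acc.1,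
       acc.2 ++ p.1))
    ([], [])
  res

-- ===== PRECONDITION & SPEC =====
-- Pre_ excludes only width = 0, where Python raises ZeroDivisionError on len(data) // width.
def Pre_find_duplicate_rows (data : List Int) (width : Int) : Prop := width ≠ 0
instance (data : List Int) (width : Int) : Decidable (Pre_find_duplicate_rows data width) := by unfold Pre_find_duplicate_rows; infer_instance
def pvWitness_find_duplicate_rows : List Int × Int := ([1, 2, 1, 2, 3, 4], 2)

def Spec_find_duplicate_rows (data : List Int) (width : Int) (out : (List (Int × Int)) × List Int) : Prop := out = find_duplicate_rows_alt data width
instance (data : List Int) (width : Int) (out : (List (Int × Int)) × List Int) : Decidable (Spec_find_duplicate_rows data width out) := by unfold Spec_find_duplicate_rows; infer_instance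

-- ===== CLAIM (what is proved, stated in full; the proofs are below) =====
def Claim_equal_find_duplicate_rows : Prop := ∀ (data : List Int) (width : Int), Dom_find_duplicate_rows data width → Pre_find_duplicate_rows data width → Spec_find_duplicate_rows data width (find_duplicate_rows data width)


-- ===== LEMMAS AND PROOFS =====
-- Proof-only helpers: everything is phrased over a generic row list rs.

-- rs.getD i [] — the i-th row
def pvKey (rs : List (List Int)) (i : Nat) : List Int := rs.getD i []

-- i is the first occurrence of its row
def pvFirst (rs : List (List Int)) (i : Nat) : Bool :=
  (List.range i).all (fun k => !(pvKey rs k == pvKey rs i))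

-- indices of first occurrences, in order
def pvF (rs : List (List Int)) : List Nat := (List.range rs.length).filter (pvFirst rs)

-- later indices holding the same row as i
def pvTail (rs : List (List Int)) (i : Nat) : List Nat :=
  (List.range' (i + 1) (rs.length - (i + 1))).filter (fun j => pvKey rs i == pvKey rs j)

def pvDups (rs : List (List Int)) (i : Nat) : List (Int × Int) :=
  (pvTail rs i).map (fun j => ((i : Int), (j : Int)))

-- A's removed_rows after the first m outer iterations
def pvSpecP (rs : List (List Int)) (m : Nat) : List (Int × Int) :=
  ((List.range m).filter (pvFirst rs)).flatMap (pvDups rs)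

def pvRows (data : List Int) (width : Int) (n : Nat) : List (List Int) :=
  (List.range n).map (fun (k : Nat) => PySem.List.slice data (some ((k : Int) * width)) (some ((k : Int) * width + width)))

-- partially filled split_data after m iterations of A's first loop
def pvRowsPart (data : List Int) (width : Int) (n m : Nat) : List (List Int) :=
  (List.range n).map (fun (k : Nat) => if k < m then PySem.List.slice data (some ((k : Int) * width)) (some ((k : Int) * width + width)) else [])

theorem pvFirst_eq_false_iff (rs : List (List Int)) (i : Nat) :
    pvFirst rs i = false ↔ ∃ k, k < i ∧ pvKey rs k = pvKey rs i := by
  rw [← Bool.not_eq_true]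
  simp [pvFirst, List.all_eq_true]

theorem pvExists_first_lt (rs : List (List Int)) (i : Nat) (h : pvFirst rs i = false) :
    ∃ k, k < i ∧ pvKey rs k = pvKey rs i ∧ pvFirst rs k = true := by
  have hex := (pvFirst_eq_false_iff rs i).mp h
  have hex' : ∃ k, pvKey rs k = pvKey rs i ∧ k < i := by
    obtain ⟨k, hk, he⟩ := hex; exact ⟨k, he, hk⟩
  classical
  obtain ⟨he, hlt⟩ := Nat.find_spec hex'
  refine ⟨Nat.find hex', hlt, he, ?_⟩
  rw [← Bool.not_eq_false, pvFirst_eq_false_iff]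
  rintro ⟨k', hk', he'⟩
  exact absurd (he'.trans he) (Nat.find_min hex' hk' ∘ fun h' => ⟨h', hk'.trans hlt⟩)

theorem pvMem_specP (rs : List (List Int)) (m : Nat) (p : Int × Int) :
    p ∈ pvSpecP rs m ↔ ∃ i j : Nat, i < m ∧ pvFirst rs i = true ∧ i < j ∧ j < rs.length ∧
      pvKey rs i = pvKey rs j ∧ p = ((i : Int), (j : Int)) := by
  unfold pvSpecP pvDups pvTail
  simp [List.mem_flatMap, List.mem_map, List.mem_filter, List.mem_range, List.mem_range']
  constructor
  · rintro ⟨a, ⟨ham, hfa⟩, i, ⟨hi, he⟩, rfl⟩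
    refine ⟨a, ham, hfa, a + 1 + i, by omega, by omega, he, ?_⟩
    constructor
  · rintro ⟨i, him, hf, x, hix, hxn, he, rfl⟩
    refine ⟨i, ⟨him, hf⟩, x - (i + 1), ⟨by omega, ?_⟩, ?_⟩
    · rw [show i + 1 + (x - (i + 1)) = x by omega]; exact he
    · rw [Prod.ext_iff]
      constructor <;> simp <;> push_cast <;> omega

theorem pvFilter_snd_specP (rs : List (List Int)) (m i : Nat) (him : i ≤ m) (hin : i < rs.length) :
    (((pvSpecP rs m).filter (fun t => t.2 == (i : Int))) ≠ []) ↔ pvFirst rs i = false := by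
  rw [Ne, List.filter_eq_nil_iff]
  push_neg
  constructor
  · rintro ⟨p, hp, hsnd⟩
    rw [pvMem_specP] at hp
    obtain ⟨i0, j, hi0, hf0, hij, hjn, he, rfl⟩ := hp
    simp only [beq_iff_eq, Int.natCast_inj] at hsnd
    rw [← hsnd]
    exact (pvFirst_eq_false_iff rs j).mpr ⟨i0, hij, he⟩
  · intro hff
    obtain ⟨k, hk, he, hfk⟩ := pvExists_first_lt rs i hff
    refine ⟨((k : Int), (i : Int)), ?_, by simp⟩
    rw [pvMem_specP]
    exact ⟨k, i, by omega, hfk, hk, hin, he, rfl⟩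

theorem pvRange_filter_key (rs : List (List Int)) (i : Nat) (hf : pvFirst rs i = true) (hin : i < rs.length) :
    (List.range rs.length).filter (fun j => pvKey rs j == pvKey rs i) = i :: pvTail rs i := by
  have hsplit : List.range rs.length
      = List.range (i + 1) ++ List.range' (i + 1) (rs.length - (i + 1)) := by
    have h2 := List.range'_append (s := 0) (m := i + 1) (n := rs.length - (i + 1)) (step := 1)
    simp only [Nat.zero_add, Nat.one_mul] at h2
    rw [List.range_eq_range', List.range_eq_range', h2]
    congr 1
    omega
  rw [hsplit, List.filter_append, List.range_succ, List.filter_append]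
  have h1 : (List.range i).filter (fun j => pvKey rs j == pvKey rs i) = [] := by
    rw [List.filter_eq_nil_iff]
    intro k hk
    have hfk := hf
    unfold pvFirst at hfk
    rw [List.all_eq_true] at hfk
    have := hfk k hk
    simpa using this
  have h2 : ([i]).filter (fun j => pvKey rs j == pvKey rs i) = [i] := by simp
  have h3 : (List.range' (i + 1) (rs.length - (i + 1))).filter (fun j => pvKey rs j == pvKey rs i)
      = pvTail rs i := by
    unfold pvTail
    apply List.filter_congr
    intro k _
    exact Bool.beq_comm
  rw [h1, h2, h3]
  rfl

theorem pvMap_key_range (rs : List (List Int)) :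
    (List.range rs.length).map (pvKey rs) = rs := by
  apply List.ext_getElem (by simp)
  intro k h1 h2
  simp [pvKey, List.getD_eq_getElem?_getD]
  simp at h1
  simp [List.getElem?_eq_getElem h2]

theorem pvKey_append (rs : List (List Int)) (x : List Int) (i : Nat) (h : i < rs.length) :
    pvKey (rs ++ [x]) i = pvKey rs i := by
  simp [pvKey, List.getD_eq_getElem?_getD, List.getElem?_append_left h]

theorem pvKey_append_self (rs : List (List Int)) (x : List Int) :
    pvKey (rs ++ [x]) rs.length = x := by
  simp [pvKey, List.getD_eq_getElem?_getD]

theorem pvFirst_append (rs : List (List Int)) (x : List Int) (i : Nat) (h : i < rs.length) :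
    pvFirst (rs ++ [x]) i = pvFirst rs i := by
  unfold pvFirst
  rw [Bool.eq_iff_iff]
  simp only [List.all_eq_true, List.mem_range]
  constructor
  · intro hh k hk
    have h2 := hh k hk
    rwa [pvKey_append rs x i h, pvKey_append rs x k (hk.trans h)] at h2
  · intro hh k hk
    have h2 := hh k hk
    rwa [pvKey_append rs x i h, pvKey_append rs x k (hk.trans h)]

theorem pvFirst_append_self (rs : List (List Int)) (x : List Int) :
    pvFirst (rs ++ [x]) rs.length = true ↔ x ∉ rs := by
  unfold pvFirst
  simp only [List.all_eq_true, List.mem_range]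
  have hmem : x ∈ rs ↔ ∃ k, k < rs.length ∧ pvKey rs k = x := by
    conv_lhs => rw [← pvMap_key_range rs]
    simp only [List.mem_map, List.mem_range]
  constructor
  · intro hh hx
    obtain ⟨k, hk, he⟩ := hmem.mp hx
    have h2 := hh k hk
    rw [pvKey_append rs x k hk, pvKey_append_self rs x] at h2
    simp [he] at h2
  · intro hx k hk
    rw [pvKey_append rs x k hk, pvKey_append_self rs x]
    simp only [Bool.not_eq_eq_eq_not, Bool.not_true, beq_eq_false_iff_ne, ne_eq]
    exact fun he => hx (hmem.mpr ⟨k, hk, he⟩)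

theorem pvOfList_eq (rs : List (List Int)) :
    PySem.Set.ofList rs = (pvF rs).map (pvKey rs) := by
  induction rs using List.reverseRecOn with
  | nil => rfl
  | append_singleton rs x ih =>
    rw [PySem.Set.ofList_append_singleton]
    unfold pvF
    have hlen : (rs ++ [x]).length = rs.length + 1 := by simp
    rw [hlen, List.range_succ, List.filter_append, List.map_append]
    have hfil : (List.range rs.length).filter (pvFirst (rs ++ [x]))
        = (List.range rs.length).filter (pvFirst rs) := by
      apply List.filter_congr
      intro k hk
      exact pvFirst_append rs x k (List.mem_range.mp hk)
    have hmapeq : ((List.range rs.length).filter (pvFirst rs)).map (pvKey (rs ++ [x]))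
        = ((List.range rs.length).filter (pvFirst rs)).map (pvKey rs) := by
      apply List.map_congr_left
      intro k hk
      exact pvKey_append rs x k (List.mem_range.mp (List.mem_of_mem_filter hk))
    have ih' : List.map (pvKey rs) (List.filter (pvFirst rs) (List.range rs.length))
        = PySem.Set.ofList rs := by rw [ih]; rfl
    rw [hfil, hmapeq, ih']
    by_cases hx : x ∈ rs
    · have hf : pvFirst (rs ++ [x]) rs.length = false :=
        Bool.eq_false_iff.mpr (fun h => ((pvFirst_append_self rs x).mp h) hx)
      simp [PySem.Set.add, hf, PySem.Set.mem_ofList, hx]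
    · have hf : pvFirst (rs ++ [x]) rs.length = true := (pvFirst_append_self rs x).mpr hx
      simp [PySem.Set.add, hf, PySem.Set.mem_ofList, hx,
        pvKey_append_self rs x]

-- A's second loop computes pvSpecP
theorem pvFoldA (rs : List (List Int)) (m : Nat) (hm : m ≤ rs.length) :
    (List.range m).foldl
      (fun rr (i : Nat) =>
        if (rr.filter (fun t => t.2 == (i : Int))) ≠ [] then rr
        else (List.range' (i + 1) (rs.length - (i + 1))).foldl
          (fun rr2 j => if pvKey rs i == pvKey rs j then rr2 ++ [((i : Int), (j : Int))] else rr2) rr)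
      [] = pvSpecP rs m := by
  induction m with
  | zero => rfl
  | succ m ih =>
    rw [List.range_succ, List.foldl_append, ih (by omega)]
    simp only [List.foldl_cons, List.foldl_nil]
    have hiff := pvFilter_snd_specP rs m m le_rfl (by omega)
    by_cases hfm : pvFirst rs m = true
    · rw [if_neg (by rw [hiff]; simp [hfm])]
      rw [PySem.List.foldl_append_if (fun j => pvKey rs m == pvKey rs j)
        (fun j => ((m : Int), (j : Int))) _ (pvSpecP rs m)]
      unfold pvSpecP
      rw [List.range_succ, List.filter_append, List.flatMap_append]
      have hfs : List.filter (pvFirst rs) [m] = [m] := by simp [hfm]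
      rw [hfs]
      simp only [List.flatMap_cons, List.flatMap_nil, List.append_nil, pvDups, pvTail]
      congr 1
      generalize (List.filter (fun j => pvKey rs m == pvKey rs j)
        (List.range' (m + 1) (rs.length - (m + 1)))) = l
      induction l with
      | nil => rfl
      | cons x t ih => simp_all
    · rw [if_pos (hiff.mpr (Bool.eq_false_iff.mpr hfm))]
      unfold pvSpecP
      rw [List.range_succ, List.filter_append]
      simp [hfm]

-- A's third loop computes the first-occurrence rows
theorem pvFoldClean (rs : List (List Int)) :
    (List.range rs.length).foldl
      (fun cd (i : Nat) => if ((pvSpecP rs rs.length).filter (fun t => t.2 == (i : Int))) ≠ [] then cd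
                   else cd ++ [pvKey rs i]) [] = (pvF rs).map (pvKey rs) := by
  rw [PySem.List.foldl_congr_mem (List.range rs.length) _
    (fun cd (i : Nat) => if pvFirst rs i = true then cd ++ [pvKey rs i] else cd) []
    (by
      intro acc i hi
      have hin : i < rs.length := List.mem_range.mp hi
      have hiff := pvFilter_snd_specP rs rs.length i (by omega) hin
      by_cases hfi : pvFirst rs i = true
      · rw [if_neg (by rw [hiff]; simp [hfi])]
        simp [hfi]
      · rw [if_pos (hiff.mpr (Bool.eq_false_iff.mpr hfi))]
        simp [hfi])]
  rw [PySem.List.foldl_append_if (pvFirst rs) (pvKey rs) (List.range rs.length) []]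
  rfl

-- A's first loop fills split_data row by row
theorem pvFoldSplit (data : List Int) (width : Int) (n : Nat) (m : Nat) (hm : m ≤ n) :
    (List.range m).foldl
      (fun (st : List (List Int) × Int) (i : Nat) =>
        (PySem.List.pySetD st.1 (i : Int) ((PySem.List.pyGetD st.1 (i : Int) []) ++ PySem.List.slice data (some st.2) (some (st.2 + width))),
         st.2 + width))
      (pvRowsPart data width n 0, 0) = (pvRowsPart data width n m, (m : Int) * width) := by
  induction m with
  | zero => simp
  | succ m ih =>
    rw [List.range_succ, List.foldl_append, ih (by omega)]
    simp only [List.foldl_cons, List.foldl_nil]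
    rw [Prod.mk.injEq]
    constructor
    · rw [PySem.List.pySetD_natCast, PySem.List.pyGetD_natCast]
      unfold pvRowsPart
      rw [PySem.List.getD_map_range _ _ _ _ (by omega)]
      simp only [Nat.lt_irrefl, if_false, List.nil_append]
      apply List.ext_getElem (by simp)
      intro k h1 h2
      simp only [List.length_set, List.length_map, List.length_range] at h1
      rw [List.getElem_set]
      simp only [List.getElem_map, List.getElem_range]
      by_cases hk : m = k
      · subst hk
        simp
      · rw [if_neg hk]
        by_cases hkm : k < m
        · rw [if_pos hkm, if_pos (by omega)]
        · rw [if_neg hkm, if_neg (by omega)]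
    · push_cast
      ring

theorem portA_eq (data : List Int) (width : Int) (hw : 0 < width) :
    find_duplicate_rows data width =
      (pvSpecP (pvRows data width (PySem.Int.floordiv (data.length : Int) width).toNat) (PySem.Int.floordiv (data.length : Int) width).toNat,
       ((pvF (pvRows data width (PySem.Int.floordiv (data.length : Int) width).toNat)).map (pvKey (pvRows data width (PySem.Int.floordiv (data.length : Int) width).toNat))).flatten) := by
  have hh0 : 0 ≤ PySem.Int.floordiv (data.length : Int) width := by
    rw [PySem.Int.floordiv_eq_ediv_of_pos hw]
    exact Int.ediv_nonneg (Int.natCast_nonneg _) (le_of_lt hw)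
  set n := (PySem.Int.floordiv (data.length : Int) width).toNat with hn
  have hcast : PySem.Int.floordiv (data.length : Int) width = (n : Int) :=
    (Int.toNat_of_nonneg hh0).symm
  have hlen : (pvRows data width n).length = n := by simp [pvRows]
  simp only [find_duplicate_rows, hcast, PySem.List.pyRange_zero_nat, List.foldl_map,
    List.map_map]
  have hinit : (List.map ((fun (_ : Int) => ([] : List Int)) ∘ fun (k : Nat) => (k : Int)) (List.range n), (0 : Int))
      = (pvRowsPart data width n 0, (0 : Int)) := by
    rw [Prod.mk.injEq]
    exact ⟨List.map_congr_left (fun k _ => by simp [pvRowsPart]), rfl⟩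
  rw [hinit, pvFoldSplit data width n n le_rfl]
  have hrr : pvRowsPart data width n n = pvRows data width n := by
    unfold pvRowsPart pvRows
    apply List.map_congr_left
    intro k hk
    simp [List.mem_range.mp hk]
  dsimp only
  rw [hrr]
  have hremoved : (List.range n).foldl
      (fun x (y : Nat) =>
        if List.filter (fun item => item.2 == (y : Int)) x ≠ [] then x
        else List.foldl
          (fun rr2 j =>
            if (PySem.List.pyGetD (pvRows data width n) (y : Int) []
                == PySem.List.pyGetD (pvRows data width n) j []) = true then
              rr2 ++ [((y : Int), j)]
            else rr2)
          x (PySem.List.pyRange ((y : Int) + 1) (n : Int)))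
      [] = pvSpecP (pvRows data width n) n := by
    rw [PySem.List.foldl_congr_mem (List.range n) _
      (fun rr (i : Nat) =>
        if (rr.filter (fun t => t.2 == (i : Int))) ≠ [] then rr
        else (List.range' (i + 1) ((pvRows data width n).length - (i + 1))).foldl
          (fun rr2 j => if pvKey (pvRows data width n) i == pvKey (pvRows data width n) j then
            rr2 ++ [((i : Int), (j : Int))] else rr2) rr)
      []
      (by
        intro acc y hy
        dsimp only
        by_cases hC : (List.filter (fun item => item.2 == (y : Int)) acc) ≠ []
        · rw [if_pos hC, if_pos hC]
        · rw [if_neg hC, if_neg hC]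
          have hr : PySem.List.pyRange ((y : Int) + 1) (n : Int) 1
              = (List.range' (y + 1) ((pvRows data width n).length - (y + 1))).map (fun (t : Nat) => (t : Int)) := by
            apply List.ext_getElem
            · simp [PySem.List.length_pyRange_one, hlen]
              omega
            · intro t h1 h2
              rw [PySem.List.getElem_pyRange_one]
              simp [List.getElem_range']
          rw [hr, List.foldl_map]
          apply PySem.List.foldl_congr_mem
          intro acc2 j hj
          simp [pvKey, PySem.List.pyGetD_natCast])]
    exact pvFoldA (pvRows data width n) n (le_of_eq hlen.symm)
  rw [hremoved]
  have hclean : (List.range n).foldl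
      (fun x (y : Nat) =>
        if List.filter (fun item => item.2 == (y : Int)) (pvSpecP (pvRows data width n) n) ≠ [] then x
        else x ++ [PySem.List.pyGetD (pvRows data width n) (y : Int) []])
      [] = (pvF (pvRows data width n)).map (pvKey (pvRows data width n)) := by
    rw [PySem.List.foldl_congr_mem (List.range n) _
      (fun cd (i : Nat) =>
        if ((pvSpecP (pvRows data width n) n).filter
            (fun t => t.2 == (i : Int))) ≠ [] then cd
        else cd ++ [pvKey (pvRows data width n) i])
      []
      (by
        intro acc y hy
        dsimp only
        simp [pvKey, PySem.List.pyGetD_natCast])]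
    have hC := pvFoldClean (pvRows data width n)
    rw [hlen] at hC
    exact hC
  rw [hclean]
  have hflat : ∀ (l : List (List Int)),
      List.foldl (fun acc row => acc ++ row) [] l = l.flatten := by
    intro l
    rw [PySem.List.foldl_append_eq_flatMap (fun (r : List Int) => r)]
    simp [List.flatMap_id']
  rw [hflat]

theorem portB_eq (data : List Int) (width : Int) (hw : 0 < width) :
    find_duplicate_rows_alt data width =
      (pvSpecP (pvRows data width (PySem.Int.floordiv (data.length : Int) width).toNat) (PySem.Int.floordiv (data.length : Int) width).toNat,
       ((pvF (pvRows data width (PySem.Int.floordiv (data.length : Int) width).toNat)).map (pvKey (pvRows data width (PySem.Int.floordiv (data.length : Int) width).toNat))).flatten) := by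
  have hh0 : 0 ≤ PySem.Int.floordiv (data.length : Int) width := by
    rw [PySem.Int.floordiv_eq_ediv_of_pos hw]
    exact Int.ediv_nonneg (Int.natCast_nonneg _) (le_of_lt hw)
  set n := (PySem.Int.floordiv (data.length : Int) width).toNat with hn
  have hcast : PySem.Int.floordiv (data.length : Int) width = (n : Int) :=
    (Int.toNat_of_nonneg hh0).symm
  set rs := pvRows data width n with hrsdef
  have hlen : rs.length = n := by simp [hrsdef, pvRows]
  simp only [find_duplicate_rows_alt, hcast, PySem.List.pyRange_zero_nat, List.foldl_map]
  have hbody : (List.range n).foldl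
      (fun g (k : Nat) => g.modify (PySem.List.slice data (some ((k : Int) * width)) (some (((k : Int) + 1) * width))) [] (fun l => l ++ [(k : Int)]))
      PySem.Dict.empty
      = (List.range n).foldl
      (fun g (k : Nat) => g.modify (pvKey rs k) [] (fun l => l ++ [(k : Int)]))
      PySem.Dict.empty := by
    apply PySem.List.foldl_congr_mem
    intro g k hk
    have hk' : k < n := List.mem_range.mp hk
    have hw' : ((k : Int) + 1) * width = (k : Int) * width + width := by ring
    have harg : PySem.List.slice data (some ((k : Int) * width)) (some (((k : Int) + 1) * width))
        = pvKey rs k := by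
      rw [hrsdef]
      unfold pvKey pvRows
      rw [PySem.List.getD_map_range _ _ _ _ hk', hw']
    rw [harg]
  rw [hbody]
  have hnodup : ((List.range n).foldl
      (fun g (k : Nat) => g.modify (pvKey rs k) [] (fun l => l ++ [(k : Int)]))
      PySem.Dict.empty).keys.Nodup := by
    apply PySem.Dict.nodup_keys_foldl_modify_key
    simp [PySem.Dict.keys_empty]
  have hkeys : ((List.range n).foldl
      (fun g (k : Nat) => g.modify (pvKey rs k) [] (fun l => l ++ [(k : Int)]))
      PySem.Dict.empty).keys = (pvF rs).map (pvKey rs) := by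
    rw [PySem.Dict.keys_foldl_modify_key (List.range n) (fun k => pvKey rs k) []
      (fun _ k => fun l => l ++ [(k : Int)]) PySem.Dict.empty]
    rw [PySem.Dict.keys_empty]
    have hupd : PySem.Set.update ([] : List (List Int)) ((List.range n).map (fun k => pvKey rs k))
        = PySem.Set.ofList ((List.range n).map (fun k => pvKey rs k)) := by
      exact PySem.Set.update_empty _
    rw [hupd, ← hlen, pvMap_key_range rs, pvOfList_eq rs]
  have hgetD : ∀ i ∈ pvF rs, ((List.range n).foldl
      (fun g (k : Nat) => g.modify (pvKey rs k) [] (fun l => l ++ [(k : Int)]))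
      PySem.Dict.empty).getD (pvKey rs i) []
      = (i : Int) :: (pvTail rs i).map (fun (j : Nat) => (j : Int)) := by
    intro i hi
    have hfirst : pvFirst rs i = true := (List.mem_filter.mp hi).2
    have hin : i < rs.length := List.mem_range.mp (List.mem_filter.mp hi).1
    have hpair : (List.range n).foldl
        (fun g (k : Nat) => g.modify (pvKey rs k) [] (fun l => l ++ [(k : Int)]))
        PySem.Dict.empty
        = ((List.range n).map (fun (k : Nat) => (pvKey rs k, (k : Int)))).foldl
          (fun d p => d.modify p.1 [] (fun x => x ++ [p.2])) PySem.Dict.empty := by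
      rw [List.foldl_map]
    rw [hpair, PySem.Dict.getD_foldl_modify_append, PySem.Dict.getD_empty, List.filter_map,
      List.map_map]
    have hfc : ((List.range n).filter ((fun p => p.1 == pvKey rs i) ∘ (fun (k : Nat) => (pvKey rs k, (k : Int)))))
        = (List.range n).filter (fun j => pvKey rs j == pvKey rs i) := by
      apply List.filter_congr
      intro k _
      rfl
    rw [hfc, ← hlen, pvRange_filter_key rs i hfirst hin]
    simp
  have hitems : ((List.range n).foldl
      (fun g (k : Nat) => g.modify (pvKey rs k) [] (fun l => l ++ [(k : Int)]))
      PySem.Dict.empty).items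
      = (pvF rs).map (fun i => (pvKey rs i, (i : Int) :: (pvTail rs i).map (fun (j : Nat) => (j : Int)))) := by
    rw [PySem.Dict.items_eq_map_keys _ hnodup [], hkeys, List.map_map]
    apply List.map_congr_left
    intro i hi
    simp only [Function.comp]
    rw [hgetD i hi]
  rw [hitems]
  refine Eq.trans (PySem.List.foldl_prod_mk
    (fun (a : List (Int × Int)) (p : List Int × List Int) =>
      List.foldl (fun rr j => rr ++ [(PySem.List.pyGetD p.2 0 0, j)]) a (PySem.List.slice p.2 (some 1)))
    (fun (b : List Int) (p : List Int × List Int) => b ++ p.1)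
    ((pvF rs).map (fun i => (pvKey rs i, (i : Int) :: (pvTail rs i).map (fun (j : Nat) => (j : Int)))))
    [] []) ?_
  rw [List.foldl_map, List.foldl_map]
  rw [Prod.mk.injEq]
  constructor
  · rw [PySem.List.foldl_congr_mem (pvF rs) _ (fun acc (i : Nat) => acc ++ pvDups rs i) []
      (by
        intro acc i hi
        dsimp only
        rw [PySem.List.slice_from_one, PySem.List.pyGetD_zero_cons, List.tail_cons,
          PySem.List.foldl_append_singleton_eq_map, List.map_map]
        simp only [pvDups]
        generalize pvTail rs i = l
        induction l with
        | nil => rfl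
        | cons x t ih => simp_all)]
    rw [PySem.List.foldl_append_eq_flatMap, List.nil_append]
    unfold pvSpecP pvF
    rw [hlen]
  · rw [PySem.List.foldl_congr_mem (pvF rs) _ (fun acc (i : Nat) => acc ++ pvKey rs i) []
      (by intro acc i hi; rfl)]
    rw [PySem.List.foldl_append_eq_flatMap, List.nil_append]
    rw [List.flatMap_def]

theorem neg_case (data : List Int) (width : Int) (hw : width < 0) :
    find_duplicate_rows data width = find_duplicate_rows_alt data width := by
  have hle : PySem.Int.floordiv (data.length : Int) width ≤ 0 := by
    by_contra hq
    push_neg at hq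
    have h1 := PySem.Int.floordiv_mul_add_mod (data.length : Int) width
    have h2 := PySem.Int.mod_neg_bounds (a := (data.length : Int)) hw
    have h3 : PySem.Int.floordiv (data.length : Int) width * width < 0 :=
      mul_neg_of_pos_of_neg hq hw
    have h4 : (0 : Int) ≤ (data.length : Int) := Int.natCast_nonneg _
    linarith [h2.2]
  have hemp : (PySem.Dict.empty : PySem.Dict (List Int) (List Int)).items = [] := rfl
  simp [find_duplicate_rows, find_duplicate_rows_alt, PySem.List.pyRange_one_eq_nil hle, hemp]

-- ===== VERDICT (by name: the statement is the Claim_ definition above) =====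
theorem find_duplicate_rows_spec : Claim_equal_find_duplicate_rows := by
  intro data width _ hpre
  unfold Spec_find_duplicate_rows
  rcases lt_or_gt_of_ne hpre with hw | hw
  · exact neg_case data width hw
  · rw [portA_eq data width hw, portB_eq data width hw]
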